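-- pv_equiv track=rewrite | github.com/statrav/-DILAB-scene_search-sese- | SESE.py | make_quotes_w2v
-- ===== SOURCE A (Python) =====
-- def make_quotes_w2v(ls):
--     quote = "SELECT video_path, begin_frame, end_frame, captions FROM activitynet WHERE (captions LIKE '%{}%'".format(ls[0])
--     if len(ls)>1:
--         for idx, word in enumerate(ls):
--             if idx > 0:
--                 if idx %2 != 0:
--                     special_token = " OR captions LIKE '%{}%')".format(ls[idx])
--                 if idx %2 == 0 :
--                     special_token = " AND (captions LIKE '%{}%'".format(ls[idx])
--                 quote += special_token
--     return quote
-- ===== SOURCE B (Python) =====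
-- def make_quotes_w2v(ls):
--     quote = "SELECT video_path, begin_frame, end_frame, captions FROM activitynet WHERE (captions LIKE '%{}%'".format(ls[0])
--     for i in range(1, len(ls), 2):
--         quote += " OR captions LIKE '%{}%')".format(ls[i])
--         if i + 1 < len(ls):
--             quote += " AND (captions LIKE '%{}%'".format(ls[i + 1])
--     return quote
-- ===== Notes on version B (the rewrite author's own statement) =====
-- stated objective: simpler
-- what changed: Replaces the per-element enumerate loop with its parity test and reassigned special_token by a single per-pair loop over range(1, len(ls), 2) that closes the OR-group and conditionally opens the next AND-group in one iteration; no len(ls)>1 guard or idx%2 branches.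
import Mathlib
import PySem

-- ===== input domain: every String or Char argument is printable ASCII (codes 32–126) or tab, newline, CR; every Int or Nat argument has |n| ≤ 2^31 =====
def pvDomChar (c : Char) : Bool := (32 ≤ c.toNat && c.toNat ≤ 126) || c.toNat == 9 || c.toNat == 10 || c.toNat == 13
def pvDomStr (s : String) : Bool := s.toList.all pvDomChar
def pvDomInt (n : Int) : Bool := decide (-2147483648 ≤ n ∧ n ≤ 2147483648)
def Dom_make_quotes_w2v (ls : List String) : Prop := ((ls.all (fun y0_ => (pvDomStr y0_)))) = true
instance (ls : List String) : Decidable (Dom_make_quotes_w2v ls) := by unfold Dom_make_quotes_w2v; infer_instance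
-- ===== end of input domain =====

-- B builds the query per pair with range(1, len, 2) instead of A's per-element enumerate loop with parity branches (objective: simpler).


-- ===== PORT A =====
def make_quotes_w2v (ls : List String) : String :=
  let quote := "SELECT video_path, begin_frame, end_frame, captions FROM activitynet WHERE (captions LIKE '%"
      ++ PySem.List.pyGetD ls 0 "" ++ "%'"
  if ls.length > 1 then
    (PySem.List.enumerate ls).foldl (fun q p =>
      if p.1 > 0 then
        let special_token :=
          if PySem.Int.mod p.1 2 ≠ 0 then " OR captions LIKE '%" ++ PySem.List.pyGetD ls p.1 "" ++ "%')"
          else " AND (captions LIKE '%" ++ PySem.List.pyGetD ls p.1 "" ++ "%'"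
        q ++ special_token
      else q) quote
  else quote

-- ===== PORT B =====
def make_quotes_w2v_alt (ls : List String) : String :=
  let quote := "SELECT video_path, begin_frame, end_frame, captions FROM activitynet WHERE (captions LIKE '%"
      ++ PySem.List.pyGetD ls 0 "" ++ "%'"
  (PySem.List.pyRange 1 (ls.length : Int) 2).foldl (fun q i =>
    let q := q ++ " OR captions LIKE '%" ++ PySem.List.pyGetD ls i "" ++ "%')"
    if i + 1 < (ls.length : Int) then
      q ++ " AND (captions LIKE '%" ++ PySem.List.pyGetD ls (i + 1) "" ++ "%'"
    else q) quote

-- ===== PRECONDITION & SPEC =====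
-- Pre_ excludes exactly the empty list, on which A raises IndexError (ls[0]).
def Pre_make_quotes_w2v (ls : List String) : Prop := ls ≠ []
instance (ls : List String) : Decidable (Pre_make_quotes_w2v ls) := by unfold Pre_make_quotes_w2v; infer_instance
def pvWitness_make_quotes_w2v : List String := ["dog", "park"]

def Spec_make_quotes_w2v (ls : List String) (out : String) : Prop := out = make_quotes_w2v_alt ls
instance (ls : List String) (out : String) : Decidable (Spec_make_quotes_w2v ls out) := by unfold Spec_make_quotes_w2v; infer_instance

-- ===== CLAIM (what is proved, stated in full; the proofs are below) =====
def Claim_equal_make_quotes_w2v : Prop := ∀ (ls : List String), Dom_make_quotes_w2v ls → Pre_make_quotes_w2v ls → Spec_make_quotes_w2v ls (make_quotes_w2v ls)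

-- ===== LEMMAS AND PROOFS =====

/-- The " OR …')" token for one word. -/
def pvOrTok (w : String) : String := " OR captions LIKE '%" ++ w ++ "%')"
/-- The " AND (…" token for one word. -/
def pvAndTok (w : String) : String := " AND (captions LIKE '%" ++ w ++ "%'"

/-- Reference: the token string both programs append after the header, consuming the tail two at a time. -/
def pvPairs : List String → String
  | [] => ""
  | [a] => pvOrTok a
  | a :: b :: rest => pvOrTok a ++ (pvAndTok b ++ pvPairs rest)

/-- Membership in `enumerate`: the index addresses that word. -/
theorem pvMem_enumerate {α : Type} [Inhabited α] (t : List α) (s : Int) (p : Int × α)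
    (hp : p ∈ PySem.List.enumerate t s) (hs : 0 ≤ s) :
    PySem.List.pyGetD t (p.1 - s) default = p.2 ∧ s ≤ p.1 := by
  induction t generalizing s with
  | nil => simp [PySem.List.enumerate] at hp
  | cons x xs ih =>
    rw [PySem.List.enumerate_cons] at hp
    rcases List.mem_cons.mp hp with hp | hp
    · subst hp; simp [PySem.List.pyGetD_zero_cons]
    · obtain ⟨h1, h2⟩ := ih (s + 1) hp (by omega)
      refine ⟨?_, by omega⟩
      have : p.1 - s = ((p.1 - (s+1)).toNat + 1 : Nat) := by omega
      rw [this, PySem.List.pyGetD_natCast]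
      have : p.1 - (s+1) = ((p.1 - (s+1)).toNat : Int) := by omega
      rw [this, PySem.List.pyGetD_natCast] at h1
      simpa using h1

/-- Step-2 range cons. -/
theorem pvPyRange_two_cons (a b : Int) (h : a < b) :
    PySem.List.pyRange a b 2 = a :: PySem.List.pyRange (a + 2) b 2 := by
  rw [PySem.List.pyRange_of_pos a b (by norm_num), PySem.List.pyRange_of_pos (a+2) b (by norm_num)]
  have h1 : ((b - a + 2 - 1) / 2).toNat = ((b - (a+2) + 2 - 1) / 2).toNat + 1 := by omega
  simp only [if_pos h, h1, List.range_succ_eq_map, List.map_cons, List.map_map]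
  congr 1
  · simp
  · split
    · congr 1; ext k; simp; ring
    · have h2 : ((b - (a+2) + 2 - 1) / 2).toNat = 0 := by omega
      simp [h2]

theorem pvPyRange_two_nil (a b : Int) (h : b ≤ a) : PySem.List.pyRange a b 2 = [] := by
  rw [PySem.List.pyRange_of_pos a b (by norm_num)]
  simp [show ¬ a < b by omega]

/-- A's loop over the enumerated tail appends exactly the alternating tokens. -/
theorem pvFoldA (t : List String) (s : Int) (acc : String) (hs : 1 ≤ s) (hodd : PySem.Int.mod s 2 = 1) :
    (PySem.List.enumerate t s).foldl (fun q (p : Int × String) =>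
      if p.1 > 0 then
        q ++ (if PySem.Int.mod p.1 2 ≠ 0 then pvOrTok p.2 else pvAndTok p.2)
      else q) acc = acc ++ pvPairs t := by
  induction t using pvPairs.induct generalizing s acc with
  | case1 => simp [PySem.List.enumerate_nil, pvPairs]
  | case2 a =>
    rw [PySem.List.enumerate_cons, PySem.List.enumerate_nil]
    simp only [List.foldl_cons, List.foldl_nil]
    rw [if_pos (show s > 0 by omega), if_pos (show PySem.Int.mod s 2 ≠ 0 by omega)]
    rfl
  | case3 a b rest ih =>
    rw [PySem.List.enumerate_cons, PySem.List.enumerate_cons]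
    have heven : PySem.Int.mod (s + 1) 2 = 0 := by
      have := PySem.Int.floordiv_mul_add_mod s 2
      have := PySem.Int.floordiv_mul_add_mod (s+1) 2
      have := PySem.Int.mod_nonneg (s+1) (by norm_num : (0:Int) < 2)
      have := PySem.Int.mod_lt (s+1) (by norm_num : (0:Int) < 2)
      omega
    have hodd2 : PySem.Int.mod (s + 1 + 1) 2 = 1 := by
      have := PySem.Int.floordiv_mul_add_mod s 2
      have := PySem.Int.floordiv_mul_add_mod (s+1+1) 2
      have := PySem.Int.mod_nonneg (s+1+1) (by norm_num : (0:Int) < 2)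
      have := PySem.Int.mod_lt (s+1+1) (by norm_num : (0:Int) < 2)
      omega
    simp only [List.foldl_cons]
    rw [if_pos (show s > 0 by omega), if_pos (show PySem.Int.mod s 2 ≠ 0 by omega),
      if_pos (show s + 1 > 0 by omega), if_neg (show ¬ PySem.Int.mod (s + 1) 2 ≠ 0 by omega)]
    rw [ih (s + 1 + 1) _ (by omega) hodd2]
    simp [pvPairs, String.append_assoc]

/-- B's loop over range(i, n, 2) appends exactly the pair tokens of the dropped tail. -/
theorem pvFoldB (ls : List String) (i : Int) (acc : String) (h0 : 0 ≤ i) :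
    (PySem.List.pyRange i (ls.length : Int) 2).foldl (fun q j =>
      (q ++ " OR captions LIKE '%" ++ PySem.List.pyGetD ls j "" ++ "%')") ++
        (if j + 1 < (ls.length : Int) then
          " AND (captions LIKE '%" ++ PySem.List.pyGetD ls (j + 1) "" ++ "%'" else "")) acc
    = acc ++ pvPairs (ls.drop i.toNat) := by
  by_cases hlt : i < (ls.length : Int)
  · rw [pvPyRange_two_cons i _ hlt, List.foldl_cons]
    have hget : PySem.List.pyGetD ls i "" = ls[i.toNat]'(by omega) :=
      PySem.List.pyGetD_eq_getElem ls "" h0 hlt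
    have hdrop : ls.drop i.toNat = ls[i.toNat]'(by omega) :: ls.drop (i.toNat + 1) :=
      List.drop_eq_getElem_cons (by omega)
    by_cases h2 : i + 1 < (ls.length : Int)
    · have hget2 : PySem.List.pyGetD ls (i + 1) "" = ls[i.toNat + 1]'(by omega) := by
        have := PySem.List.pyGetD_eq_getElem ls "" (i := i + 1) (by omega) h2
        simpa [show (i+1).toNat = i.toNat + 1 by omega] using this
      have hdrop2 : ls.drop (i.toNat + 1) = ls[i.toNat + 1]'(by omega) :: ls.drop (i.toNat + 2) :=
        List.drop_eq_getElem_cons (by omega)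
      have := pvFoldB ls (i + 2)
        ((acc ++ " OR captions LIKE '%" ++ PySem.List.pyGetD ls i "" ++ "%')") ++
          (" AND (captions LIKE '%" ++ PySem.List.pyGetD ls (i + 1) "" ++ "%'")) (by omega)
      rw [if_pos h2, this]
      rw [hdrop, hdrop2, hget, hget2]
      simp [pvPairs, pvOrTok, pvAndTok, String.append_assoc,
        show (i + 2).toNat = i.toNat + 2 by omega]
    · have hend : (ls.length : Int) ≤ i + 2 := by omega
      rw [if_neg h2]
      rw [pvFoldB ls (i + 2) _ (by omega)]
      have : ls.drop (i + 2).toNat = [] := by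
        apply List.drop_eq_nil_of_le; omega
      rw [this]
      have : ls.drop (i.toNat + 1) = [] := by
        apply List.drop_eq_nil_of_le; omega
      rw [hdrop, this, hget]
      simp [pvPairs, pvOrTok, String.append_assoc]
  · rw [pvPyRange_two_nil _ _ (by omega), List.foldl_nil]
    rw [List.drop_eq_nil_of_le (by omega)]
    simp [pvPairs]
termination_by ((ls.length : Int) + 2 - i).toNat
decreasing_by all_goals omega

/-- B's port evaluates to header ++ pvPairs tail. -/
theorem pvAltEq (x : String) (t : List String) :
    make_quotes_w2v_alt (x :: t) =
      ("SELECT video_path, begin_frame, end_frame, captions FROM activitynet WHERE (captions LIKE '%"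
        ++ x ++ "%'") ++ pvPairs t := by
  have hfun : (fun (q : String) (i : Int) =>
      let q := q ++ " OR captions LIKE '%" ++ PySem.List.pyGetD (x :: t) i "" ++ "%')"
      if i + 1 < ((x :: t).length : Int) then
        q ++ " AND (captions LIKE '%" ++ PySem.List.pyGetD (x :: t) (i + 1) "" ++ "%'"
      else q)
    = (fun (q : String) (j : Int) =>
      (q ++ " OR captions LIKE '%" ++ PySem.List.pyGetD (x :: t) j "" ++ "%')") ++
        (if j + 1 < ((x :: t).length : Int) then
          " AND (captions LIKE '%" ++ PySem.List.pyGetD (x :: t) (j + 1) "" ++ "%'" else "")) := by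
    funext q j
    dsimp only
    split <;> simp only [String.append_assoc, String.append_empty]
  unfold make_quotes_w2v_alt
  rw [hfun, pvFoldB (x :: t) 1 _ (by norm_num)]
  simp [PySem.List.pyGetD_zero_cons]

/-- A's port evaluates to header ++ pvPairs tail. -/
theorem pvOrigEq (x : String) (t : List String) :
    make_quotes_w2v (x :: t) =
      ("SELECT video_path, begin_frame, end_frame, captions FROM activitynet WHERE (captions LIKE '%"
        ++ x ++ "%'") ++ pvPairs t := by
  unfold make_quotes_w2v
  cases t with
  | nil => simp [pvPairs, PySem.List.pyGetD_zero_cons]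
  | cons y t' =>
    rw [if_pos (by simp)]
    rw [PySem.List.enumerate_cons, List.foldl_cons]
    rw [if_neg (by norm_num)]
    have hfun : ∀ p ∈ PySem.List.enumerate (y :: t') (0 + 1), ∀ (q : String),
        (fun (q : String) (p : Int × String) =>
          if p.1 > 0 then
            let special_token :=
              if PySem.Int.mod p.1 2 ≠ 0 then
                " OR captions LIKE '%" ++ PySem.List.pyGetD (x :: y :: t') p.1 "" ++ "%')"
              else " AND (captions LIKE '%" ++ PySem.List.pyGetD (x :: y :: t') p.1 "" ++ "%'"
            q ++ special_token
          else q) q p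
        = (fun (q : String) (p : Int × String) =>
          if p.1 > 0 then
            q ++ (if PySem.Int.mod p.1 2 ≠ 0 then pvOrTok p.2 else pvAndTok p.2)
          else q) q p := by
      intro p hp q
      have hmem : p ∈ PySem.List.enumerate (x :: y :: t') 0 := by
        rw [PySem.List.enumerate_cons]
        exact List.mem_cons_of_mem _ hp
      obtain ⟨h1, _⟩ := pvMem_enumerate (x :: y :: t') 0 p hmem le_rfl
      rw [sub_zero] at h1
      have h1' : PySem.List.pyGetD (x :: y :: t') p.1 "" = p.2 := h1
      simp only [pvOrTok, pvAndTok, h1', String.append_assoc]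
    rw [PySem.List.foldl_congr_mem' _ _ _ _ hfun]
    rw [show (0 : Int) + 1 = 1 by norm_num]
    rw [pvFoldA (y :: t') 1 _ le_rfl (by decide)]
    simp [PySem.List.pyGetD_zero_cons]

-- ===== VERDICT (by name: the statement is the Claim_ definition above) =====
theorem make_quotes_w2v_spec : Claim_equal_make_quotes_w2v := by
  intro ls _ hpre
  unfold Spec_make_quotes_w2v
  obtain ⟨x, t, rfl⟩ : ∃ x t, ls = x :: t := by
    cases ls with
    | nil => exact absurd rfl hpre
    | cons x t => exact ⟨x, t, rfl⟩
  rw [pvOrigEq, pvAltEq]
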